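-- pv_equiv track=rewrite | github.com/jk-jung/problem-solving | codewars/6kyu/6_Tick Toward.py | tick_toward
-- ===== SOURCE A (Python) =====
-- def tick_toward(s, e):
--     r = [(*s,)]
--     s, e = list(s), list(e)
--     while s != e:
--         for i in range(2):
--             if s[i] < e[i]: s[i] += 1
--             elif s[i] > e[i]: s[i] -= 1
--         r.append((*s,))
--     return r
-- ===== SOURCE B (Python) =====
-- def tick_toward(s, e):
--     def sgn(x):
--         return 1 if x > 0 else (-1 if x < 0 else 0)
--     dx, dy = e[0] - s[0], e[1] - s[1]
--     n = max(abs(dx), abs(dy))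
--     return [(s[0] + sgn(dx) * min(k, abs(dx)),
--              s[1] + sgn(dy) * min(k, abs(dy))) for k in range(n + 1)]
-- ===== Notes on version B (the rewrite author's own statement) =====
-- stated objective: alternative
-- what changed: Replaces the in-place step-by-step while-loop simulation with a closed-form per-axis interpolation: each point is computed directly from its index k as s + sgn(d)*min(k,|d|).
import Mathlib
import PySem

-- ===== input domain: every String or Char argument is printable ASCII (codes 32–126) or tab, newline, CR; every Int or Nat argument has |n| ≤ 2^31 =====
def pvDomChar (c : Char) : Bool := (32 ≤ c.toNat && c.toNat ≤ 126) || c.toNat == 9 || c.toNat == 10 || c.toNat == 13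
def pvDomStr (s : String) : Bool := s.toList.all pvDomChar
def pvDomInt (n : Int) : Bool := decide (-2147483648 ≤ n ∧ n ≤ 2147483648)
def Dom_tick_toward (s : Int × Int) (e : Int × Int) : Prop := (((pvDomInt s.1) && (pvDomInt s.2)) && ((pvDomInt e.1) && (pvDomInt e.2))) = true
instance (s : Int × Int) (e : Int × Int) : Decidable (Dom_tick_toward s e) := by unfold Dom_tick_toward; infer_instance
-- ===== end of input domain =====

-- B replaces A's in-place while-loop simulation by a closed-form per-index interpolation (objective: alternative).

-- ===== PORT A =====
-- one coordinate update of the for-i-in-range(2) body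
def tickStep (si ei : Int) : Int := if si < ei then si + 1 else if si > ei then si - 1 else si

-- the while loop, with fuel (|dx|+|dy| suffices) only to make the same computation total
def tickLoopF : Nat → (Int × Int) → (Int × Int) → List (Int × Int)
  | 0, _, _ => []
  | fuel + 1, s, e =>
    if s = e then []
    else
      (tickStep s.1 e.1, tickStep s.2 e.2) :: tickLoopF fuel (tickStep s.1 e.1, tickStep s.2 e.2) e

def tick_toward (s : Int × Int) (e : Int × Int) : List (Int × Int) :=
  s :: tickLoopF ((e.1 - s.1).natAbs + (e.2 - s.2).natAbs) s e

-- ===== PORT B =====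
def pySgn (x : Int) : Int := if x > 0 then 1 else if x < 0 then -1 else 0

def tick_toward_alt (s : Int × Int) (e : Int × Int) : List (Int × Int) :=
  let dx := e.1 - s.1
  let dy := e.2 - s.2
  let n := max |dx| |dy|
  (List.range (n.toNat + 1)).map (fun (k : ℕ) =>
    (s.1 + pySgn dx * min (k : Int) |dx|, s.2 + pySgn dy * min (k : Int) |dy|))

-- ===== PRECONDITION & SPEC =====
def Spec_tick_toward (s : Int × Int) (e : Int × Int) (out : List (Int × Int)) : Prop := out = tick_toward_alt s e
instance (s : Int × Int) (e : Int × Int) (out : List (Int × Int)) : Decidable (Spec_tick_toward s e out) := by unfold Spec_tick_toward; infer_instance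

-- ===== CLAIM (what is proved, stated in full; the proofs are below) =====
def Claim_equal_tick_toward : Prop := ∀ (s : Int × Int) (e : Int × Int), Dom_tick_toward s e → Spec_tick_toward s e (tick_toward s e)

-- ===== LEMMAS AND PROOFS =====

-- the closed-form point at index k, starting from s
def pvPoint (s e : Int × Int) (k : Int) : Int × Int :=
  (s.1 + pySgn (e.1 - s.1) * min k |e.1 - s.1|,
   s.2 + pySgn (e.2 - s.2) * min k |e.2 - s.2|)

-- shifting the interpolation one step: point k+1 from s equals point k from the stepped start
lemma pvPoint_shift (s e : Int × Int) (hne : s ≠ e) (k : Int) (hk : 0 ≤ k) :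
    pvPoint s e (k + 1) = pvPoint (tickStep s.1 e.1, tickStep s.2 e.2) e k := by
  rcases s with ⟨a, b⟩; rcases e with ⟨c, d⟩
  simp only [pvPoint, pySgn, tickStep, Prod.mk.injEq, Int.abs_eq_natAbs]
  constructor <;> (split_ifs <;> omega)

lemma pvMax_step (s e : Int × Int) (hne : s ≠ e) :
    (max |e.1 - s.1| |e.2 - s.2|).toNat
      = (max |e.1 - (tickStep s.1 e.1)| |e.2 - (tickStep s.2 e.2)|).toNat + 1 := by
  rcases s with ⟨a, b⟩; rcases e with ⟨c, d⟩
  have h' : ¬(a = c ∧ b = d) := fun hcd => hne (by simp [hcd.1, hcd.2])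
  dsimp only [tickStep]
  simp only [Int.abs_eq_natAbs]
  split_ifs <;> omega

lemma pvPoint_zero (s e : Int × Int) : pvPoint s e 0 = s := by
  rcases s with ⟨a, b⟩
  simp [pvPoint]

lemma tickLoop_closed (N : ℕ) : ∀ (fuel : ℕ) (s e : Int × Int),
    (max |e.1 - s.1| |e.2 - s.2|).toNat = N → N ≤ fuel →
    s :: tickLoopF fuel s e = (List.range (N + 1)).map (fun (k : ℕ) => pvPoint s e (k : Int)) := by
  induction N with
  | zero =>
    intro fuel s e hN _
    rcases s with ⟨a, b⟩; rcases e with ⟨c, d⟩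
    simp only [Int.abs_eq_natAbs] at hN
    have h1 : a = c := by omega
    have h2 : b = d := by omega
    subst h1; subst h2
    cases fuel with
    | zero => simp [tickLoopF, pvPoint_zero]
    | succ f => simp [tickLoopF, pvPoint_zero]
  | succ n ih =>
    intro fuel s e hN hfuel
    have hne : s ≠ e := by
      intro h; subst h
      simp only [sub_self, abs_zero, max_self, Int.toNat_zero] at hN
      omega
    obtain ⟨f, rfl⟩ : ∃ f, fuel = f + 1 := ⟨fuel - 1, by omega⟩
    rw [tickLoopF, if_neg hne]
    have hN' : (max |e.1 - (tickStep s.1 e.1)| |e.2 - (tickStep s.2 e.2)|).toNat = n := by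
      have := pvMax_step s e hne; omega
    have ih' := ih f (tickStep s.1 e.1, tickStep s.2 e.2) e hN' (by omega)
    rw [List.range_succ_eq_map, List.map_cons, List.map_map, Nat.cast_zero, pvPoint_zero]
    congr 1
    rw [ih']
    apply List.map_congr_left
    intro k _
    have hc : ((k + 1 : ℕ) : Int) = (k : Int) + 1 := by push_cast; ring
    simp only [Function.comp_apply, Nat.succ_eq_add_one, hc]
    rw [pvPoint_shift s e hne (k : Int) (by positivity)]

lemma alt_eq_point (s e : Int × Int) :
    tick_toward_alt s e
      = (List.range ((max |e.1 - s.1| |e.2 - s.2|).toNat + 1)).map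
          (fun (k : ℕ) => pvPoint s e (k : Int)) := by
  rfl

-- ===== VERDICT (by name: the statement is the Claim_ definition above) =====
theorem tick_toward_spec : Claim_equal_tick_toward := by
  intro s e _
  unfold Spec_tick_toward
  rw [alt_eq_point]
  apply tickLoop_closed _ _ s e rfl
  rcases s with ⟨a, b⟩; rcases e with ⟨c, d⟩
  simp only [Int.abs_eq_natAbs]
  omega
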